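-- pv_equiv track=rewrite | github.com/xandecosta/ecd_parser | exporters/audit_exporter.py | _montar_nome_csv
-- ===== SOURCE A (Python) =====
-- def _montar_nome_csv(prefixo: str, teste: str) -> str:
--     """Monta o nome do arquivo CSV seguindo o padrão: PERIODO_07_Auditoria_TESTE.csv"""
--     # Sanitiza: remove caracteres proibidos em nomes de arquivo
--     proibidos = [":", "\\", "/", "?", "*", "[", "]"]
--     nome_limpo = str(teste)
--     for p in proibidos:
--         nome_limpo = nome_limpo.replace(p, "_")
--     if prefixo:
--         return f"{prefixo}_07_Auditoria_{nome_limpo}.csv"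
--     return f"07_Auditoria_{nome_limpo}.csv"
-- ===== SOURCE B (Python) =====
-- def _montar_nome_csv(prefixo: str, teste: str) -> str:
--     """Monta o nome do arquivo CSV seguindo o padrão: PERIODO_07_Auditoria_TESTE.csv"""
--     # Tokeniza: corta o nome nos caracteres proibidos e religa os pedaços com '_',
--     # de forma que cada caractere proibido vira exatamente um '_'.
--     proibidos = set(":\\/?*[]")
--     tokens = []
--     cur = []
--     for ch in str(teste):
--         if ch in proibidos:
--             tokens.append("".join(cur))
--             cur = []
--         else:
--             cur.append(ch)
--     tokens.append("".join(cur))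
--     nome_limpo = "_".join(tokens)
--     parts = ([prefixo] if prefixo else []) + ["07_Auditoria_" + nome_limpo + ".csv"]
--     return "_".join(parts)
-- ===== Notes on version B (the rewrite author's own statement) =====
-- stated objective: alternative
-- what changed: B tokenizes the name in one pass into runs delimited by forbidden characters and rejoins the token list (and the optional prefix part) with '_'.join, instead of A's seven sequential whole-string replace passes.
import Mathlib
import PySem

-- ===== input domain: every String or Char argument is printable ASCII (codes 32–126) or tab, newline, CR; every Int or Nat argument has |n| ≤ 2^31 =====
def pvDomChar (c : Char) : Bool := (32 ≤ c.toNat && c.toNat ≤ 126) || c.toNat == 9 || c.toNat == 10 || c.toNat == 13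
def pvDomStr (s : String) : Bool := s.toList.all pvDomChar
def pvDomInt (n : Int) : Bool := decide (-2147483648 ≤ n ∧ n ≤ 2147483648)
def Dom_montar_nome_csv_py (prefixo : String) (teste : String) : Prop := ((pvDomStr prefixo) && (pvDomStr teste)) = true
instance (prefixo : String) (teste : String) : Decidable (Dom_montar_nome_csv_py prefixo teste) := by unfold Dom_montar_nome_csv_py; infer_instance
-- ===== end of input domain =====

-- B builds the sanitized name by tokenizing on forbidden characters in one pass and rejoining the tokens (and optional prefix) with '_', instead of A's seven sequential whole-string replace passes (return value only).


-- ===== PORT A =====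
def montar_nome_csv_py (prefixo : String) (teste : String) : String :=
  let proibidos : List String := [":", "\\", "/", "?", "*", "[", "]"]
  let nome_limpo : String := proibidos.foldl (fun acc p => PySem.Str.replace acc p "_") teste
  if prefixo ≠ "" then prefixo ++ "_07_Auditoria_" ++ nome_limpo ++ ".csv"
  else "07_Auditoria_" ++ nome_limpo ++ ".csv"

-- ===== PORT B =====
-- the forbidden-character set (Python: set(":\\/?*[]"))
def pvProibidos : List Char := [':', '\\', '/', '?', '*', '[', ']']

-- loop body: a forbidden char closes the current token, any other char extends it
def pvStep (st : List (List Char) × List Char) (c : Char) : List (List Char) × List Char :=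
  if c ∈ pvProibidos then (st.1 ++ [st.2], []) else (st.1, st.2 ++ [c])

-- tokens are kept as char lists; "_".join is ported as List.intercalate ['_'] (exact for '_'.join on these tokens)
def montar_nome_csv_py_alt (prefixo : String) (teste : String) : String :=
  let st := teste.toList.foldl pvStep ([], [])
  let tokens := st.1 ++ [st.2]
  let nome_limpo := List.intercalate ['_'] tokens
  let parts := (if prefixo ≠ "" then [prefixo.toList] else []) ++
    ["07_Auditoria_".toList ++ nome_limpo ++ ".csv".toList]
  String.ofList (List.intercalate ['_'] parts)

-- ===== PRECONDITION & SPEC =====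
def Spec_montar_nome_csv_py (prefixo : String) (teste : String) (out : String) : Prop := out = montar_nome_csv_py_alt prefixo teste
instance (prefixo : String) (teste : String) (out : String) : Decidable (Spec_montar_nome_csv_py prefixo teste out) := by unfold Spec_montar_nome_csv_py; infer_instance

-- ===== CLAIM (what is proved, stated in full; the proofs are below) =====
def Claim_equal_montar_nome_csv_py : Prop := ∀ (prefixo : String) (teste : String), Dom_montar_nome_csv_py prefixo teste → Spec_montar_nome_csv_py prefixo teste (montar_nome_csv_py prefixo teste)

-- ===== LEMMAS AND PROOFS =====

-- the per-character sanitizer both sides compute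
def pvF (c : Char) : Char := if c ∈ pvProibidos then '_' else c

-- replace.go for a one-character pattern and replacement is a per-character map
lemma replace_go_single (p r : Char) : ∀ (fuel : Nat) (l acc : List Char), l.length ≤ fuel →
    PySem.Chars.replace.go [p] [r] fuel l acc
      = acc.reverse ++ l.map (fun c => if c = p then r else c) := by
  intro fuel
  induction fuel with
  | zero =>
    intro l acc h
    have : l = [] := List.length_eq_zero_iff.mp (Nat.le_zero.mp h)
    subst this
    simp [PySem.Chars.replace.go]
  | succ n ih =>
    intro l acc h
    cases l with
    | nil => simp [PySem.Chars.replace.go]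
    | cons c t =>
      simp only [PySem.Chars.replace.go]
      by_cases hc : c = p
      · subst hc
        have hpre : [c].isPrefixOf (c :: t) = true := by simp [List.isPrefixOf]
        rw [if_pos hpre]
        show PySem.Chars.replace.go [c] [r] n t (r :: acc) = _
        rw [ih t (r :: acc) (by simpa using Nat.lt_succ_iff.mp (by simpa using h))]
        simp
      · have hpre : [p].isPrefixOf (c :: t) = false := by
          simp [List.isPrefixOf]
          exact fun h' => absurd h'.symm hc
        rw [if_neg (by simp [hpre])]
        show PySem.Chars.replace.go [p] [r] n t (c :: acc) = _
        rw [ih t (c :: acc) (by simpa using Nat.lt_succ_iff.mp (by simpa using h))]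
        simp [hc]

-- replacing a single character by a single character is a map
lemma replace_single (p r : Char) (l : List Char) :
    PySem.Chars.replace l [p] [r] = l.map (fun c => if c = p then r else c) := by
  unfold PySem.Chars.replace
  rw [if_neg (by simp)]
  simpa using replace_go_single p r l.length l [] le_rfl

-- A's seven sequential single-character replaces compute the per-character map pvF
lemma chain_eq_map (l : List Char) :
    PySem.Chars.replace (PySem.Chars.replace (PySem.Chars.replace (PySem.Chars.replace
      (PySem.Chars.replace (PySem.Chars.replace (PySem.Chars.replace l
        [':'] ['_']) ['\\'] ['_']) ['/'] ['_']) ['?'] ['_']) ['*'] ['_']) ['['] ['_']) [']'] ['_']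
      = l.map pvF := by
  rw [replace_single, replace_single, replace_single, replace_single,
      replace_single, replace_single, replace_single]
  simp only [List.map_map]
  apply List.map_congr_left
  intro c _
  by_cases hc : c ∈ pvProibidos
  · simp only [pvProibidos, List.mem_cons, List.not_mem_nil, or_false] at hc
    rcases hc with rfl | rfl | rfl | rfl | rfl | rfl | rfl <;> decide
  · simp only [pvProibidos, List.mem_cons, List.not_mem_nil, or_false, not_or] at hc
    obtain ⟨h1, h2, h3, h4, h5, h6, h7⟩ := hc
    simp [Function.comp, pvF, pvProibidos, h1, h2, h3, h4, h5, h6, h7]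

-- intercalate on a nonempty tail
lemma inter_cons (x y : List Char) (l : List (List Char)) :
    List.intercalate ['_'] (x :: y :: l) = x ++ '_' :: List.intercalate ['_'] (y :: l) := by
  simp [List.intercalate, List.intersperse]

lemma inter_singleton (y : List Char) : List.intercalate ['_'] [y] = y := by
  simp [List.intercalate]

-- extending the last token extends the joined result
lemma inter_last : ∀ (xs : List (List Char)) (y z : List Char),
    List.intercalate ['_'] (xs ++ [y ++ z]) = List.intercalate ['_'] (xs ++ [y]) ++ z := by
  intro xs
  induction xs with
  | nil => intro y z; simp [inter_singleton]
  | cons x xs ih =>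
    intro y z
    cases xs with
    | nil => simp [inter_cons, inter_singleton]
    | cons x' xs' =>
      simp only [List.cons_append, inter_cons]
      simp only [List.cons_append] at ih
      rw [ih]
      simp

-- closing a token appends a '_' to the joined result
lemma inter_close : ∀ (xs : List (List Char)) (y : List Char),
    List.intercalate ['_'] ((xs ++ [y]) ++ [[]]) = List.intercalate ['_'] (xs ++ [y]) ++ ['_'] := by
  intro xs
  induction xs with
  | nil => intro y; simp [inter_cons, inter_singleton]
  | cons x xs ih =>
    intro y
    cases xs with
    | nil => simp [inter_cons, inter_singleton]
    | cons x' xs' =>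
      have := ih y
      simp only [List.cons_append, inter_cons] at this ⊢
      rw [this]
      simp

-- loop invariant: the join of the state's tokens tracks the per-character map
lemma split_inv : ∀ (l : List Char) (tokens : List (List Char)) (cur : List Char),
    List.intercalate ['_'] ((l.foldl pvStep (tokens, cur)).1 ++ [(l.foldl pvStep (tokens, cur)).2])
      = List.intercalate ['_'] (tokens ++ [cur]) ++ l.map pvF := by
  intro l
  induction l with
  | nil => intro tokens cur; simp
  | cons c t ih =>
    intro tokens cur
    simp only [List.foldl_cons, List.map_cons]
    by_cases hc : c ∈ pvProibidos
    · rw [show pvStep (tokens, cur) c = (tokens ++ [cur], []) by simp [pvStep, hc]]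
      rw [ih, inter_close, show pvF c = '_' by simp [pvF, hc]]
      simp
    · rw [show pvStep (tokens, cur) c = (tokens, cur ++ [c]) by simp [pvStep, hc]]
      rw [ih, show tokens ++ [cur ++ [c]] = tokens ++ [cur ++ [c]] from rfl, inter_last,
          show pvF c = c by simp [pvF, hc]]
      simp

-- ===== VERDICT (by name: the statement is the Claim_ definition above) =====
theorem montar_nome_csv_py_spec : Claim_equal_montar_nome_csv_py := by
  intro prefixo teste _
  unfold Spec_montar_nome_csv_py montar_nome_csv_py montar_nome_csv_py_alt
  have hsplit := split_inv teste.toList [] []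
  simp only [List.nil_append, inter_singleton] at hsplit
  refine String.toList_inj.mp ?_
  by_cases hp : prefixo = "" <;>
    simp [hp, hsplit, inter_cons, inter_singleton, chain_eq_map]
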